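-- pv_equiv track=rewrite | github.com/Narodni-repozitar/nr-app | invenio_nusl/cli.py | create_slug
-- ===== SOURCE A (Python) =====
-- import unicodedata
--
-- def create_slug(department):
--     l = len(department)
--     slug = remove_diacritics(department).lower()
--     slug_array = slug.split(" ")
--     if l > 64:
--         new_slug = ""
--         old_slug = ""
--         i = 0
--         j = -1
--         l = 0
--         while l < 64:
--             new_slug += f"{slug_array[i]}_"
--             if j >= 0:
--                 old_slug += f"{slug_array[j]}_"
--             i += 1
--             j += 1
--             l = len(new_slug)
--         slug = old_slug
--         if slug.endswith("_"):
--             slug = slug[:-1]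
--     else:
--         slug = "_".join(slug_array)
--     return slug
--
-- def remove_diacritics(text):
--     text = unicodedata.normalize('NFKD', text)
--     output = ''
--     for c in text:
--         if not unicodedata.combining(c):
--             output += c
--     return output
-- ===== SOURCE B (Python) =====
-- import unicodedata
--
--
-- def create_slug(department):
--     # single character-level pass: no word list, no incremental slug strings
--     slug = ''.join(c for c in unicodedata.normalize('NFKD', department)
--                    if not unicodedata.combining(c)).lower()
--     if len(department) <= 64:
--         return slug.replace(' ', '_')
--     prev = -1
--     for i, c in enumerate(slug + ' '):
--         if c == ' ':
--             if i >= 63: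
--                 break
--             prev = i
--     return slug[:prev].replace(' ', '_') if prev >= 0 else ''
-- ===== Notes on version B (the rewrite author's own statement) =====
-- stated objective: alternative
-- what changed: A splits into a word list and walks it with a while loop building two lagged underscore-joined strings, then strips a trailing underscore; B never builds a word list: it scans the cleaned string once character by character (enumerate) tracking the last word-boundary index before position 63, then returns one prefix slice with spaces mapped to underscores.
import Mathlib
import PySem

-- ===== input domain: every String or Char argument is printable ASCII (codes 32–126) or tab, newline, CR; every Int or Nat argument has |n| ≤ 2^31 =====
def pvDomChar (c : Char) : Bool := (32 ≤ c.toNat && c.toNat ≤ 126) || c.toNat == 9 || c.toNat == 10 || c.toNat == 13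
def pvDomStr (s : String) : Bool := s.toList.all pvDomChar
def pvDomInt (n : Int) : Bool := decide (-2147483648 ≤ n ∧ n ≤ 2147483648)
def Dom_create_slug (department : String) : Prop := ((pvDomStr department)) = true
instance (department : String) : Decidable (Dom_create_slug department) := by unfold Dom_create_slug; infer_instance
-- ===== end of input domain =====

-- B replaces A's word-splitting while loop (which builds two lagged slug strings word by word and
-- strips a trailing underscore) by a single character-level scan of the cleaned string that tracks
-- the last word-boundary index before position 63, then takes one prefix (objective: alternative);
-- equal on the whole printable-ASCII domain (there A never raises).

-- ===== PORT A =====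
-- unicodedata.combining is 0 for every ASCII character and NFKD is the identity on ASCII,
-- so on the stated domain this model of unicodedata.combining is exact.
def pvCombining (_c : Char) : Bool := false

-- remove_diacritics: builds the output character by character (result kept as List Char)
def remove_diacritics (text : String) : List Char :=
  text.toList.foldl (fun output c => if pvCombining c then output else output ++ [c]) []

-- the while loop: new_/old_ are new_slug/old_slug; prev is slug_array[j] (none while j < 0).
-- The [] case is where Python raises IndexError; it is unreachable on the ASCII domain
-- (the slug keeps the department's length, so new_slug reaches 64 before the words run out).
def pvLoopA : List (List Char) → Option (List Char) → List Char → List Char → List Char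
  | [], _, _, old => old
  | w :: rest, prev, new_, old =>
      if (new_ ++ w ++ ['_']).length < 64 then
        pvLoopA rest (some w) (new_ ++ w ++ ['_'])
          (match prev with | some p => old ++ p ++ ['_'] | none => old)
      else
        (match prev with | some p => old ++ p ++ ['_'] | none => old)

def create_slug (department : String) : String :=
  let l := PySem.Str.len department
  let slug := PySem.Chars.lower (remove_diacritics department)
  let slug_array := PySem.Chars.splitOn slug [' ']
  if 64 < l then
    let s := pvLoopA slug_array none [] []
    let s := if PySem.Chars.endswith s ['_'] then PySem.Chars.slice s none (some (-1)) else s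
    String.ofList s
  else
    String.ofList (PySem.Chars.join ['_'] slug_array)

-- ===== PORT B =====
-- the for loop of Source B over enumerate(slug + ' '): prev accumulator, break at the first space
-- whose index is >= 63 (break = return the current prev)
def pvScanB : List (Int × Char) → Int → Int
  | [], prev => prev
  | (i, c) :: rest, prev =>
      if c = ' ' then (if 63 ≤ i then prev else pvScanB rest i)
      else pvScanB rest prev

def create_slug_alt (department : String) : String :=
  -- ''.join(c for c in normalize(...) if not combining(c)) = a filter over the characters
  let slug := PySem.Chars.lower (department.toList.filter (fun c => !pvCombining c))
  if PySem.Str.len department ≤ 64 then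
    String.ofList (PySem.Chars.replace slug [' '] ['_'])
  else
    let prev := pvScanB (PySem.List.enumerate (slug ++ [' '])) (-1)
    if 0 ≤ prev then
      String.ofList (PySem.Chars.replace (PySem.List.slice slug none (some prev)) [' '] ['_'])
    else
      String.ofList []

-- ===== PRECONDITION & SPEC =====
def Spec_create_slug (department : String) (out : String) : Prop := out = create_slug_alt department
instance (department : String) (out : String) : Decidable (Spec_create_slug department out) := by unfold Spec_create_slug; infer_instance

-- ===== CLAIM (what is proved, stated in full; the proofs are below) =====
def Claim_equal_create_slug : Prop := ∀ (department : String), Dom_create_slug department → Spec_create_slug department (create_slug department)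

-- ===== LEMMAS AND PROOFS =====

-- the character translation performed by slug.replace(' ', '_')
def pvTr (c : Char) : Char := if c = ' ' then '_' else c

-- reference version of splitting on a single space
def pvSplitSp : List Char → List (List Char)
  | [] => [[]]
  | c :: r =>
      if c = ' ' then [] :: pvSplitSp r
      else match pvSplitSp r with
           | [] => [[c]]
           | p :: ps => (c :: p) :: ps

def pvConsHead (pre : List Char) : List (List Char) → List (List Char)
  | [] => [pre]
  | p :: ps => (pre ++ p) :: ps

-- words glued as A's loop glues them: each word followed by '_'
def pvUnd : List (List Char) → List Char
  | [] => []
  | w :: r => w ++ '_' :: pvUnd r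

-- each word followed by ' ' (the shape of slug + ' ')
def pvUndSp : List (List Char) → List Char
  | [] => []
  | w :: r => w ++ ' ' :: pvUndSp r

-- number of words A's loop consumes before stopping (all of them if the total never reaches 64)
def pvCnt : List (List Char) → Nat → Nat
  | [], _ => 0
  | w :: r, t => if 64 ≤ t + w.length + 1 then 1 else 1 + pvCnt r (t + w.length + 1)

-- the words that end up in old_slug, beyond the pending prev word
def pvKlist : List (List Char) → Nat → List (List Char) → List (List Char)
  | [], _, _ => []
  | w :: r, t, prev => if 64 ≤ t + w.length + 1 then prev else prev ++ pvKlist r (t + w.length + 1) [w]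

def pvOptL : Option (List Char) → List (List Char)
  | none => []
  | some p => [p]

-- what B's scan computes, stated word by word: d chars consumed, p the current prev
def pvPrevI : List (List Char) → Nat → Int → Int
  | [], _, p => p
  | w :: r, d, p =>
      if 63 ≤ d + w.length then p
      else pvPrevI r (d + w.length + 1) ((d + w.length : Nat) : Int)

def pvSumLen (ws : List (List Char)) : Nat := (ws.map (fun w => w.length + 1)).sum

-- ---------- A-side lemmas ----------

theorem pvKlist_cons_lt (w : List Char) (r : List (List Char)) (t : Nat) (prev : List (List Char))
    (h : ¬ 64 ≤ t + w.length + 1) :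
    pvKlist (w :: r) t prev = prev ++ pvKlist r (t + w.length + 1) [w] := by
  simp only [pvKlist, if_neg h]

theorem pvCnt_cons_lt (w : List Char) (r : List (List Char)) (t : Nat)
    (h : ¬ 64 ≤ t + w.length + 1) :
    pvCnt (w :: r) t = 1 + pvCnt r (t + w.length + 1) := by
  simp only [pvCnt, if_neg h]

theorem pvLoopA_eq (ws : List (List Char)) :
    ∀ (prev : Option (List Char)) (new_ old : List Char),
      pvLoopA ws prev new_ old = old ++ pvUnd (pvKlist ws new_.length (pvOptL prev)) := by
  induction ws with
  | nil =>
      intro prev new_ old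
      simp [pvLoopA, pvKlist, pvUnd]
  | cons w r ih =>
      intro prev new_ old
      have hlen : (new_ ++ w ++ ['_']).length = new_.length + w.length + 1 := by
        simp only [List.length_append, List.length_cons, List.length_nil]
        try omega
      simp only [pvLoopA]
      by_cases h : (new_ ++ w ++ ['_']).length < 64
      · rw [if_pos h, ih]
        rw [hlen] at h
        have h2 : ¬ 64 ≤ new_.length + (w.length + 1) := by omega
        cases prev <;>
          simp [pvKlist, h2, pvOptL, pvUnd, Nat.add_assoc]
      · rw [if_neg h]
        rw [hlen] at h
        have h' : 64 ≤ new_.length + w.length + 1 := by omega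
        cases prev <;> simp [pvKlist, h', pvOptL, pvUnd]

theorem pvKlist_eq_take (ws : List (List Char)) :
    ∀ (t : Nat) (prev : List (List Char)), ws ≠ [] →
      pvKlist ws t prev = prev ++ ws.take (pvCnt ws t - 1) := by
  induction ws with
  | nil => intro t prev h; exact absurd rfl h
  | cons w r ih =>
      intro t prev _
      by_cases h : 64 ≤ t + w.length + 1
      · simp [pvKlist, pvCnt, h]
      · cases r with
        | nil => simp [pvKlist, pvCnt, h]
        | cons q s =>
            have hne : (q :: s) ≠ ([] : List (List Char)) := by simp
            have hcnt : 1 ≤ pvCnt (q :: s) (t + w.length + 1) := by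
              simp only [pvCnt]; split <;> omega
            rw [pvKlist_cons_lt _ _ _ _ h, pvCnt_cons_lt _ _ _ h, ih _ _ hne]
            have h1 : 1 + pvCnt (q :: s) (t + w.length + 1) - 1
                = (pvCnt (q :: s) (t + w.length + 1) - 1) + 1 := by omega
            rw [h1, List.take_succ_cons]
            simp

theorem pvUnd_eq_join (xs : List (List Char)) (h : xs ≠ []) :
    pvUnd xs = PySem.Chars.join ['_'] xs ++ ['_'] := by
  induction xs with
  | nil => exact absurd rfl h
  | cons w r ih =>
      cases r with
      | nil => simp [pvUnd, PySem.Chars.join_singleton]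
      | cons q s =>
          rw [PySem.Chars.join_cons_cons]
          have hrec : pvUnd (w :: q :: s) = w ++ '_' :: pvUnd (q :: s) := rfl
          rw [hrec, ih (by simp)]
          simp

theorem pvStrip_und (xs : List (List Char)) :
    (if PySem.Chars.endswith (pvUnd xs) ['_'] then PySem.Chars.slice (pvUnd xs) none (some (-1)) else pvUnd xs)
      = PySem.Chars.join ['_'] xs := by
  cases xs with
  | nil => simp [pvUnd, PySem.Chars.join_nil]; decide
  | cons w r =>
      have hne : w :: r ≠ ([] : List (List Char)) := by simp
      rw [pvUnd_eq_join _ hne]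
      have hend : PySem.Chars.endswith (PySem.Chars.join ['_'] (w :: r) ++ ['_']) ['_'] = true := by
        rw [PySem.Chars.endswith_iff]; exact List.suffix_append _ _
      rw [if_pos hend]
      simp [PySem.Chars.slice_eq_listSlice, PySem.List.slice_to_neg_one]

theorem pvRemove_eq (t : String) : remove_diacritics t = t.toList := by
  show t.toList.foldl (fun output c => if pvCombining c then output else output ++ [c]) [] = t.toList
  have : ∀ (l acc : List Char),
      l.foldl (fun output c => if pvCombining c then output else output ++ [c]) acc = acc ++ l := by
    intro l
    induction l with
    | nil => intro acc; simp
    | cons c r ih =>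
        intro acc
        rw [List.foldl_cons]
        have hif : (if pvCombining c = true then acc else acc ++ [c]) = acc ++ [c] := by
          simp [pvCombining]
        rw [hif, ih]
        simp
  simpa using this t.toList []

-- A's long branch, summarised
theorem pvA_long (ws : List (List Char)) (h : ws ≠ []) :
    (if PySem.Chars.endswith (pvLoopA ws none [] []) ['_']
       then PySem.Chars.slice (pvLoopA ws none [] []) none (some (-1))
       else pvLoopA ws none [] [])
      = PySem.Chars.join ['_'] (ws.take (pvCnt ws 0 - 1)) := by
  have hl : pvLoopA ws none [] [] = pvUnd (ws.take (pvCnt ws 0 - 1)) := by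
    rw [pvLoopA_eq]
    simp only [List.length_nil, pvOptL, List.nil_append]
    rw [pvKlist_eq_take ws 0 [] h, List.nil_append]
  rw [hl, pvStrip_und]

-- ---------- splitOn on a single space ----------

theorem pvSplitSp_ne_nil (s : List Char) : pvSplitSp s ≠ [] := by
  cases s with
  | nil => simp [pvSplitSp]
  | cons c r =>
      simp only [pvSplitSp]
      split
      · simp
      · split <;> simp

theorem pvSplitOn_go_eq (fuel : Nat) :
    ∀ (l cur : List Char) (acc : List (List Char)), l.length < fuel →
      PySem.Chars.splitOn.go [' '] fuel l cur acc = acc.reverse ++ pvConsHead cur.reverse (pvSplitSp l) := by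
  induction fuel with
  | zero => intro l cur acc h; omega
  | succ n ih =>
      intro l cur acc h
      cases l with
      | nil =>
          simp [PySem.Chars.splitOn.go, pvSplitSp, pvConsHead]
      | cons c rest =>
          have hrest : rest.length < n := by simpa using h
          by_cases hc : c = ' '
          · subst hc
            have hpre : ([' '] : List Char).isPrefixOf (' ' :: rest) = true := by
              simp [List.isPrefixOf]
            simp only [PySem.Chars.splitOn.go, hpre, if_pos, List.length_cons, List.drop_succ_cons,
              List.length_nil, List.drop_zero]
            rw [ih _ _ _ hrest]
            obtain ⟨p, ps, hps⟩ : ∃ p ps, pvSplitSp rest = p :: ps := by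
              cases hsp : pvSplitSp rest with
              | nil => exact absurd hsp (pvSplitSp_ne_nil rest)
              | cons p ps => exact ⟨p, ps, rfl⟩
            simp [pvSplitSp, hps, pvConsHead]
          · have hpre : ([' '] : List Char).isPrefixOf (c :: rest) = false := by
              simp [List.isPrefixOf]
              exact fun hh => absurd hh.symm hc
            simp only [PySem.Chars.splitOn.go, hpre, Bool.false_eq_true, if_false]
            rw [ih _ _ _ hrest]
            obtain ⟨p, ps, hps⟩ : ∃ p ps, pvSplitSp rest = p :: ps := by
              cases hsp : pvSplitSp rest with
              | nil => exact absurd hsp (pvSplitSp_ne_nil rest)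
              | cons p ps => exact ⟨p, ps, rfl⟩
            simp [pvSplitSp, hps, pvConsHead, hc]

theorem pvSplitOn_sp (s : List Char) : PySem.Chars.splitOn s [' '] = pvSplitSp s := by
  show PySem.Chars.splitOn.go [' '] (s.length + 1) s [] [] = pvSplitSp s
  rw [pvSplitOn_go_eq (s.length + 1) s [] [] (by omega)]
  obtain ⟨p, ps, hps⟩ : ∃ p ps, pvSplitSp s = p :: ps := by
    cases hsp : pvSplitSp s with
    | nil => exact absurd hsp (pvSplitSp_ne_nil s)
    | cons p ps => exact ⟨p, ps, rfl⟩
  simp [hps, pvConsHead]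

theorem pvSplitSp_join (s : List Char) : PySem.Chars.join [' '] (pvSplitSp s) = s := by
  induction s with
  | nil => simp [pvSplitSp, PySem.Chars.join_singleton]
  | cons c r ih =>
      by_cases hc : c = ' '
      · subst hc
        obtain ⟨p, ps, hps⟩ : ∃ p ps, pvSplitSp r = p :: ps := by
          cases hsp : pvSplitSp r with
          | nil => exact absurd hsp (pvSplitSp_ne_nil r)
          | cons p ps => exact ⟨p, ps, rfl⟩
        rw [hps] at ih
        simp only [pvSplitSp, hps, if_true]
        rw [PySem.Chars.join_cons_cons, ih]
        simp
      · obtain ⟨p, ps, hps⟩ : ∃ p ps, pvSplitSp r = p :: ps := by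
          cases hsp : pvSplitSp r with
          | nil => exact absurd hsp (pvSplitSp_ne_nil r)
          | cons p ps => exact ⟨p, ps, rfl⟩
        rw [hps] at ih
        simp only [pvSplitSp, if_neg hc, hps]
        cases ps with
        | nil =>
            rw [PySem.Chars.join_singleton] at ih
            rw [PySem.Chars.join_singleton, ih]
        | cons q qs =>
            rw [PySem.Chars.join_cons_cons] at ih
            rw [PySem.Chars.join_cons_cons, ← ih]
            simp

theorem pvSplitSp_space_free (s : List Char) : ∀ w ∈ pvSplitSp s, ' ' ∉ w := by
  induction s with
  | nil =>
      intro w hw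
      have : w = [] := by simpa [pvSplitSp] using hw
      simp [this]
  | cons c r ih =>
      intro w hw
      by_cases hc : c = ' '
      · subst hc
        have hw' : w = [] ∨ w ∈ pvSplitSp r := by
          simpa [pvSplitSp] using hw
        rcases hw' with h | h
        · simp [h]
        · exact ih w h
      · obtain ⟨p, ps, hps⟩ : ∃ p ps, pvSplitSp r = p :: ps := by
          cases hsp : pvSplitSp r with
          | nil => exact absurd hsp (pvSplitSp_ne_nil r)
          | cons p ps => exact ⟨p, ps, rfl⟩
        simp only [pvSplitSp, if_neg hc, hps, List.mem_cons] at hw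
        rcases hw with h | h
        · subst h
          intro hmem
          rcases List.mem_cons.mp hmem with h' | h'
          · exact hc h'.symm
          · exact ih p (by simp [hps]) h'
        · exact ih w (by simp [hps, h])

-- ---------- replace(' ', '_') ----------

theorem pvReplace_go_eq (fuel : Nat) :
    ∀ (l acc : List Char), l.length ≤ fuel →
      PySem.Chars.replace.go [' '] ['_'] fuel l acc = acc.reverse ++ l.map pvTr := by
  induction fuel with
  | zero =>
      intro l acc h
      have : l = [] := by cases l <;> simp_all
      subst this
      simp [PySem.Chars.replace.go]
  | succ n ih =>
      intro l acc h
      cases l with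
      | nil => simp [PySem.Chars.replace.go]
      | cons c t =>
          have ht : t.length ≤ n := by simpa using h
          by_cases hc : c = ' '
          · subst hc
            have hpre : ([' '] : List Char).isPrefixOf (' ' :: t) = true := by
              simp [List.isPrefixOf]
            simp only [PySem.Chars.replace.go, hpre, if_pos, List.length_cons, List.length_nil,
              List.drop_succ_cons, List.drop_zero]
            rw [ih _ _ ht]
            simp [pvTr]
          · have hpre : ([' '] : List Char).isPrefixOf (c :: t) = false := by
              simp [List.isPrefixOf]
              exact fun hh => absurd hh.symm hc
            simp only [PySem.Chars.replace.go, hpre, Bool.false_eq_true, if_false]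
            rw [ih _ _ ht]
            simp [pvTr, hc]

theorem pvReplace_map (s : List Char) : PySem.Chars.replace s [' '] ['_'] = s.map pvTr := by
  show (if ([' '] : List Char).isEmpty = true then _ else PySem.Chars.replace.go [' '] ['_'] s.length s []) = s.map pvTr
  rw [if_neg (by simp)]
  rw [pvReplace_go_eq s.length s [] le_rfl]
  simp

theorem pvMapTr_id (w : List Char) (h : ' ' ∉ w) : w.map pvTr = w := by
  induction w with
  | nil => simp
  | cons c r ih =>
      have hc : c ≠ ' ' := fun hh => h (by simp [hh])
      simp only [List.map_cons, pvTr, if_neg hc]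
      rw [ih (fun hm => h (by simp [hm]))]

theorem pvMapTr_join (ws : List (List Char)) (h : ∀ w ∈ ws, ' ' ∉ w) :
    (PySem.Chars.join [' '] ws).map pvTr = PySem.Chars.join ['_'] ws := by
  induction ws with
  | nil => simp [PySem.Chars.join_nil]
  | cons w r ih =>
      cases r with
      | nil =>
          rw [PySem.Chars.join_singleton, PySem.Chars.join_singleton]
          exact pvMapTr_id w (h w (by simp))
      | cons q s =>
          rw [PySem.Chars.join_cons_cons, PySem.Chars.join_cons_cons]
          have hr : ∀ v ∈ q :: s, ' ' ∉ v := fun v hv => h v (by simp [hv])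
          rw [List.map_append, List.map_append, pvMapTr_id w (h w (by simp)), ih hr]
          simp [pvTr]

-- join '_' of the split pieces is exactly the character translation of the string
theorem pvJoinSplit_map (s : List Char) :
    PySem.Chars.join ['_'] (pvSplitSp s) = s.map pvTr := by
  conv_rhs => rw [← pvSplitSp_join s]
  exact (pvMapTr_join _ (pvSplitSp_space_free s)).symm

-- ---------- B's scan ----------

theorem pvEnum_cons {α : Type} (x : α) (xs : List α) (s : Int) :
    PySem.List.enumerate (x :: xs) s = (s, x) :: PySem.List.enumerate xs (s + 1) := by
  simp [PySem.List.enumerate]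

theorem pvScan_skip_word (w : List Char) (hw : ' ' ∉ w) :
    ∀ (rest : List Char) (s : Int) (p : Int),
      pvScanB (PySem.List.enumerate (w ++ rest) s) p
        = pvScanB (PySem.List.enumerate rest (s + w.length)) p := by
  induction w with
  | nil => intro rest s p; simp
  | cons c w' ih =>
      intro rest s p
      have hc : c ≠ ' ' := fun hh => hw (by simp [hh])
      rw [List.cons_append, pvEnum_cons]
      simp only [pvScanB, if_neg hc]
      rw [ih (fun hm => hw (by simp [hm])) rest (s + 1) p]
      have : s + 1 + (w'.length : Int) = s + ((w'.length + 1 : Nat) : Int) := by push_cast; ring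
      simp [this]

theorem pvScan_eq_prevI (ws : List (List Char)) (h : ∀ w ∈ ws, ' ' ∉ w) :
    ∀ (d : Nat) (p : Int),
      pvScanB (PySem.List.enumerate (pvUndSp ws) (d : Int)) p = pvPrevI ws d p := by
  induction ws with
  | nil => intro d p; simp [pvUndSp, pvScanB, pvPrevI]
  | cons w r ih =>
      intro d p
      show pvScanB (PySem.List.enumerate (w ++ ' ' :: pvUndSp r) (d : Int)) p = _
      rw [pvScan_skip_word w (h w (by simp)), pvEnum_cons]
      have hcast : (d : Int) + (w.length : Int) = ((d + w.length : Nat) : Int) := by push_cast; ring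
      have hstep : pvScanB (((d : Int) + (w.length : Int), ' ') :: PySem.List.enumerate (pvUndSp r) ((d : Int) + (w.length : Int) + 1)) p
          = if 63 ≤ (d : Int) + (w.length : Int) then p
            else pvScanB (PySem.List.enumerate (pvUndSp r) ((d : Int) + (w.length : Int) + 1)) ((d : Int) + (w.length : Int)) := by
        simp [pvScanB]
      rw [hstep]
      by_cases hb : 63 ≤ d + w.length
      · rw [if_pos (by rw [hcast]; exact_mod_cast hb)]
        simp [pvPrevI, hb]
      · rw [if_neg (by rw [hcast]; exact_mod_cast hb)]
        rw [hcast]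
        have h1 : ((d + w.length : Nat) : Int) + 1 = ((d + w.length + 1 : Nat) : Int) := by push_cast; ring_nf
        rw [h1, ih (fun v hv => h v (by simp [hv]))]
        simp [pvPrevI, hb]

theorem pvCnt_pos (ws : List (List Char)) (h : ws ≠ []) (d : Nat) : 1 ≤ pvCnt ws d := by
  cases ws with
  | nil => exact absurd rfl h
  | cons w r => simp only [pvCnt]; split <;> omega

theorem pvCnt_le_length (ws : List (List Char)) : ∀ d, pvCnt ws d ≤ ws.length := by
  induction ws with
  | nil => intro d; simp [pvCnt]
  | cons w r ih =>
      intro d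
      simp only [pvCnt, List.length_cons]
      split
      · omega
      · have := ih (d + w.length + 1); omega

theorem pvSumLen_pos (ws : List (List Char)) (h : ws ≠ []) : 1 ≤ pvSumLen ws := by
  cases ws with
  | nil => exact absurd rfl h
  | cons w r => simp [pvSumLen]; omega

theorem pvSumLen_join (ws : List (List Char)) (h : ws ≠ []) :
    pvSumLen ws = (PySem.Chars.join [' '] ws).length + 1 := by
  induction ws with
  | nil => exact absurd rfl h
  | cons w r ih =>
      cases r with
      | nil => simp [pvSumLen, PySem.Chars.join_singleton]
      | cons q s =>
          rw [PySem.Chars.join_cons_cons]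
          have := ih (by simp)
          simp only [pvSumLen, List.map_cons, List.sum_cons] at this ⊢
          simp only [List.length_append, List.length_cons, List.length_nil]
          omega

theorem pvPrevI_eq (ws : List (List Char)) :
    ∀ (d : Nat) (p : Int), ws ≠ [] → 64 ≤ d + pvSumLen ws →
      pvPrevI ws d p
        = if pvCnt ws d = 1 then p
          else ((d + pvSumLen (ws.take (pvCnt ws d - 1)) : Nat) : Int) - 1 := by
  induction ws with
  | nil => intro d p h _; exact absurd rfl h
  | cons w r ih =>
      intro d p _ hsum
      by_cases hb : 63 ≤ d + w.length
      · have hcnt : pvCnt (w :: r) d = 1 := by simp [pvCnt]; omega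
        simp [pvPrevI, hb, hcnt]
      · have hcnt : pvCnt (w :: r) d = 1 + pvCnt r (d + w.length + 1) := by
          apply pvCnt_cons_lt; omega
        have hr : r ≠ [] := by
          intro hrr
          subst hrr
          simp [pvSumLen] at hsum
          omega
        have hsum' : 64 ≤ (d + w.length + 1) + pvSumLen r := by
          simp only [pvSumLen, List.map_cons, List.sum_cons] at hsum
          simp only [pvSumLen]
          omega
        have hcnt' : 1 ≤ pvCnt r (d + w.length + 1) := pvCnt_pos r hr _
        simp only [pvPrevI, if_neg hb]
        rw [ih _ _ hr hsum', hcnt]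
        by_cases h1 : pvCnt r (d + w.length + 1) = 1
        · rw [if_pos h1, if_neg (by omega)]
          have : 1 + pvCnt r (d + w.length + 1) - 1 = 1 := by omega
          rw [this]
          simp [pvSumLen]
          push_cast
          ring
        · rw [if_neg h1, if_neg (by omega)]
          have h2 : 1 + pvCnt r (d + w.length + 1) - 1 = (pvCnt r (d + w.length + 1) - 1) + 1 := by omega
          rw [h2, List.take_succ_cons]
          simp only [pvSumLen, List.map_cons, List.sum_cons]
          congr 1
          push_cast
          ring

theorem pvTakeAppend (w r : List Char) (n : Nat) : (w ++ r).take (w.length + n) = w ++ r.take n := by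
  rw [List.take_append]
  simp

theorem pvTake_join (ws : List (List Char)) :
    ∀ (n : Nat), 1 ≤ n → n ≤ ws.length →
      (PySem.Chars.join [' '] ws).take (pvSumLen (ws.take n) - 1)
        = PySem.Chars.join [' '] (ws.take n) := by
  induction ws with
  | nil => intro n h1 h2; simp at h2; omega
  | cons w r ih =>
      intro n h1 h2
      obtain ⟨m, rfl⟩ : ∃ m, n = m + 1 := ⟨n - 1, by omega⟩
      rw [List.take_succ_cons]
      cases hm : m with
      | zero =>
          subst hm
          simp only [List.take_zero]
          have hsum : pvSumLen [w] - 1 = w.length := by simp [pvSumLen]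
          rw [hsum, PySem.Chars.join_singleton]
          cases r with
          | nil => rw [PySem.Chars.join_singleton]; simp
          | cons q s =>
              rw [PySem.Chars.join_cons_cons, List.append_assoc, List.take_left]
      | succ m' =>
          subst hm
          have hr : r ≠ [] := by
            intro hrr; subst hrr; simp at h2
          obtain ⟨q, s, rfl⟩ : ∃ q s, r = q :: s := by
            cases r with
            | nil => exact absurd rfl hr
            | cons q s => exact ⟨q, s, rfl⟩
          have htk : (q :: s).take (m' + 1) ≠ [] := by simp
          have hsum1 : 1 ≤ pvSumLen ((q :: s).take (m' + 1)) := pvSumLen_pos _ htk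
          have hsplit : pvSumLen (w :: (q :: s).take (m' + 1)) - 1
              = w.length + 1 + (pvSumLen ((q :: s).take (m' + 1)) - 1) := by
            have h1' := hsum1
            simp only [pvSumLen, List.map_cons, List.sum_cons] at h1' ⊢
            omega
          rw [hsplit, PySem.Chars.join_cons_cons]
          have hjoin2 : PySem.Chars.join [' '] (w :: (q :: s).take (m' + 1))
              = w ++ [' '] ++ PySem.Chars.join [' '] ((q :: s).take (m' + 1)) := by
            obtain ⟨p, ps, hps⟩ : ∃ p ps, (q :: s).take (m' + 1) = p :: ps := by
              cases htt : (q :: s).take (m' + 1) with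
              | nil => exact absurd htt htk
              | cons p ps => exact ⟨p, ps, rfl⟩
            rw [hps, PySem.Chars.join_cons_cons]
          rw [hjoin2]
          have harr : w.length + 1 + (pvSumLen ((q :: s).take (m' + 1)) - 1)
              = (w ++ [' ']).length + (pvSumLen ((q :: s).take (m' + 1)) - 1) := by simp
          rw [harr, pvTakeAppend]
          congr 1
          have := ih (m' + 1) (by omega) (by simpa using h2)
          simpa using this

theorem pvTakeNeNil {α : Type} (ws : List α) (n : Nat) (h : ws ≠ []) (hn : 1 ≤ n) :
    ws.take n ≠ [] := by
  cases ws with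
  | nil => exact absurd rfl h
  | cons w r =>
      cases n with
      | zero => omega
      | succ m => simp

theorem pvUndSp_eq (ws : List (List Char)) (h : ws ≠ []) :
    pvUndSp ws = PySem.Chars.join [' '] ws ++ [' '] := by
  induction ws with
  | nil => exact absurd rfl h
  | cons w r ih =>
      cases r with
      | nil => simp [pvUndSp, PySem.Chars.join_singleton]
      | cons q s =>
          rw [PySem.Chars.join_cons_cons]
          have hrec : pvUndSp (w :: q :: s) = w ++ ' ' :: pvUndSp (q :: s) := rfl
          rw [hrec, ih (by simp)]
          simp

-- ---------- main equality ----------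

theorem create_slug_eq_alt (department : String) :
    create_slug department = create_slug_alt department := by
  have hA : remove_diacritics department = department.toList := pvRemove_eq department
  have hB : department.toList.filter (fun c => !pvCombining c) = department.toList := by
    simp [pvCombining]
  simp only [create_slug, create_slug_alt, hA, hB]
  set slug := PySem.Chars.lower department.toList with hslug
  by_cases hl : PySem.Str.len department ≤ 64
  · rw [if_neg (by omega), if_pos hl]
    rw [pvSplitOn_sp, pvJoinSplit_map, pvReplace_map]
  · rw [if_pos (by omega), if_neg hl]
    set ws := pvSplitSp slug with hws
    rw [pvSplitOn_sp]
    have hwsne : ws ≠ [] := pvSplitSp_ne_nil slug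
    have hsf : ∀ w ∈ ws, ' ' ∉ w := pvSplitSp_space_free slug
    have hjoin : PySem.Chars.join [' '] ws = slug := pvSplitSp_join slug
    -- the slug keeps the department's length
    have hlen : slug.length = department.toList.length := by
      rw [hslug]
      simp [PySem.Chars.lower]
    have hlen64 : 64 < slug.length := by
      have : PySem.Str.len department = (department.toList.length : Int) := by
        simp [PySem.Str.len]
      omega
    have hsum : 64 ≤ 0 + pvSumLen ws := by
      rw [pvSumLen_join ws hwsne, hjoin]
      omega
    -- B's scanned prev
    have hscan : pvScanB (PySem.List.enumerate (slug ++ [' '])) (-1) = pvPrevI ws 0 (-1) := by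
      have := pvScan_eq_prevI ws hsf 0 (-1)
      rw [pvUndSp_eq ws hwsne, hjoin] at this
      simpa using this
    rw [hscan, pvPrevI_eq ws 0 (-1) hwsne hsum]
    rw [pvA_long ws hwsne]
    set k := pvCnt ws 0 with hk
    by_cases h1 : k = 1
    · rw [if_pos h1, if_neg (by norm_num)]
      rw [h1]
      simp [PySem.Chars.join_nil]
    · rw [if_neg h1]
      have hk1 : 1 ≤ k := pvCnt_pos ws hwsne 0
      have hkle : k ≤ ws.length := pvCnt_le_length ws 0
      have htkne : ws.take (k - 1) ≠ [] := pvTakeNeNil ws (k - 1) hwsne (by omega)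
      have hS : 1 ≤ pvSumLen (ws.take (k - 1)) := pvSumLen_pos _ htkne
      have hprev : (0 : Int) ≤ ((0 + pvSumLen (ws.take (k - 1)) : Nat) : Int) - 1 := by
        omega
      rw [if_pos hprev]
      rw [PySem.List.slice_to slug (by push_cast; omega)]
      have htoNat : (((0 + pvSumLen (ws.take (k - 1)) : Nat) : Int) - 1).toNat
          = pvSumLen (ws.take (k - 1)) - 1 := by omega
      rw [htoNat, pvReplace_map]
      have htake := pvTake_join ws (k - 1) (by omega) (by omega)
      rw [← hjoin, htake]
      congr 1
      exact (pvMapTr_join _ (fun w hw => hsf w (List.mem_of_mem_take hw))).symm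

-- ===== VERDICT (by name: the statement is the Claim_ definition above) =====
theorem create_slug_spec : Claim_equal_create_slug := by
  intro department _
  show create_slug department = create_slug_alt department
  exact create_slug_eq_alt department
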